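-- pv_equiv track=rewrite | github.com/happidaswork-netizen/d2ilite | scripts/backfill_wenming_full_story.py | _find_non_space_offset
-- ===== SOURCE A (Python) =====
-- def _find_non_space_offset(text: str, target_non_space_idx: int) -> int:
--     seen = 0
--     for i, ch in enumerate(text):
--         if ch.isspace():
--             continue
--         if seen == target_non_space_idx:
--             return i
--         seen += 1
--     return -1
-- ===== SOURCE B (Python) =====
-- def _find_non_space_offset(text: str, target_non_space_idx: int) -> int:
--     positions = [i for i, ch in enumerate(text) if not ch.isspace()]
--     if 0 <= target_non_space_idx < len(positions):
--         return positions[target_non_space_idx]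
--     return -1
-- ===== Notes on version B (the rewrite author's own statement) =====
-- stated objective: simpler
-- what changed: Replaces the interleaved counting scan with early exit by building the list of all non-space offsets once and returning a single bounds-checked indexed lookup.
import Mathlib
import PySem

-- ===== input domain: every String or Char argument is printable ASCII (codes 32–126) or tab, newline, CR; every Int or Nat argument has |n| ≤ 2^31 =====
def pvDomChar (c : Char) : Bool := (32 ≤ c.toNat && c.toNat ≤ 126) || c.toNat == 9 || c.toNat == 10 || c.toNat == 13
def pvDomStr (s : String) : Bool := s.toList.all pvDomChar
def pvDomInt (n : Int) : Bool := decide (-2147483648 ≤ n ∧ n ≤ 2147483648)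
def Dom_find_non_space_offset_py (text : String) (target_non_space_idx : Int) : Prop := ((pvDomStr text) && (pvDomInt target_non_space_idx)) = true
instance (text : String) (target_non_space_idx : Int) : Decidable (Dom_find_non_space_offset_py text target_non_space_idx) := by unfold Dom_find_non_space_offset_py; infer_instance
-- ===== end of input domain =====

-- ===== PORT A =====
-- B builds the list of non-space offsets once and does one bounds-checked lookup,
-- instead of A's interleaved counting scan with early exit (objective: simpler).
def pvGoA : List Char → Int → Int → Int → Int
  | [], _, _, _ => -1
  | c :: cs, i, seen, t =>
    if PySem.Chars.isspace c then pvGoA cs (i + 1) seen t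
    else if seen = t then i
    else pvGoA cs (i + 1) (seen + 1) t

def find_non_space_offset_py (text : String) (target_non_space_idx : Int) : Int :=
  pvGoA text.toList 0 0 target_non_space_idx

-- ===== PORT B =====
-- the comprehension '[i for i, ch in enumerate(text) if not ch.isspace()]'
def pvPosFrom : List Char → Int → List Int
  | [], _ => []
  | c :: cs, i =>
    if PySem.Chars.isspace c then pvPosFrom cs (i + 1)
    else i :: pvPosFrom cs (i + 1)

def find_non_space_offset_py_alt (text : String) (target_non_space_idx : Int) : Int :=
  let positions := pvPosFrom text.toList 0
  if 0 ≤ target_non_space_idx ∧ target_non_space_idx < positions.length then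
    positions.getD target_non_space_idx.toNat (-1)
  else -1

-- ===== PRECONDITION & SPEC =====
def Spec_find_non_space_offset_py (text : String) (target_non_space_idx : Int) (out : Int) : Prop := out = find_non_space_offset_py_alt text target_non_space_idx
instance (text : String) (target_non_space_idx : Int) (out : Int) : Decidable (Spec_find_non_space_offset_py text target_non_space_idx out) := by unfold Spec_find_non_space_offset_py; infer_instance

-- ===== CLAIM (what is proved, stated in full; the proofs are below) =====
def Claim_equal_find_non_space_offset_py : Prop := ∀ (text : String) (target_non_space_idx : Int), Dom_find_non_space_offset_py text target_non_space_idx → Spec_find_non_space_offset_py text target_non_space_idx (find_non_space_offset_py text target_non_space_idx)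

-- ===== LEMMAS AND PROOFS =====
lemma pvGoA_eq (cs : List Char) (i s t : Int) :
    pvGoA cs i s t =
      (if 0 ≤ t - s ∧ t - s < (pvPosFrom cs i).length then
        (pvPosFrom cs i).getD (t - s).toNat (-1)
      else -1) := by
  induction cs generalizing i s with
  | nil => simp [pvGoA, pvPosFrom]
  | cons c cs ih =>
    by_cases hsp : PySem.Chars.isspace c
    · simp [pvGoA, pvPosFrom, hsp, ih]
    · by_cases hst : s = t
      · subst hst
        simp [pvGoA, pvPosFrom, hsp]
      · have h1 : t - s ≠ 0 := by omega
        simp only [pvGoA, pvPosFrom, hsp, hst, ih, Bool.false_eq_true, if_false]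
        have hlen : ((i :: pvPosFrom cs (i + 1)) : List Int).length
            = (pvPosFrom cs (i + 1)).length + 1 := rfl
        by_cases hc : 0 ≤ t - (s + 1) ∧ t - (s + 1) < (pvPosFrom cs (i + 1)).length
        · have hc' : 0 ≤ t - s ∧ t - s < ((i :: pvPosFrom cs (i + 1)) : List Int).length := by
            simp [hlen]; omega
          rw [if_pos hc, if_pos hc']
          have hn : (t - s).toNat = (t - (s + 1)).toNat + 1 := by omega
          simp [hn]
        · have hc' : ¬ (0 ≤ t - s ∧ t - s < ((i :: pvPosFrom cs (i + 1)) : List Int).length) := by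
            simp [hlen]; omega
          rw [if_neg hc, if_neg hc']

-- ===== VERDICT (by name: the statement is the Claim_ definition above) =====
theorem find_non_space_offset_py_spec : Claim_equal_find_non_space_offset_py := by
  intro text t _
  unfold Spec_find_non_space_offset_py find_non_space_offset_py find_non_space_offset_py_alt
  rw [pvGoA_eq]
  simp
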